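-- pv_equiv track=rewrite | github.com/Lander37/Robot-Simulator | mapdesctest.py | generateMapDescriptor
-- ===== SOURCE A (Python) =====
-- import copy
--
-- def get_hex(ar):
--     """Get hex value of the binary map"""
--     current = 0
--     val = 8
--     ans = ''
--     if((len(ar) % 4) != 0):
--         return ""
--     for i in range(len(ar)):
--         current = current + val * ar[i]
--         val //= 2
--         if(val == 0):
--             ans = ans + hex(current)[2:]
--             val = 8
--             current = 0
--     return ans
--
-- def generateMapDescriptor(resultMap):
--     """Generate map descriptor"""
--     temp = copy.copy(resultMap)
--     mapDescriptor = [1,1]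
--     for i in range(len(temp) - 1, -1, -1):
--     # for i in range(len(temp)):
--         for j in range(len(temp[i])):
--             if temp[i][j] == -1:
--                 mapDescriptor.append(0)
--             else:
--                 mapDescriptor.append(1)
--     mapDescriptor += [1,1]
--     print (mapDescriptor)
--     print (len(mapDescriptor))
--     return get_hex(mapDescriptor)
-- ===== SOURCE B (Python) =====
-- def generateMapDescriptor(resultMap):
--     """Generate map descriptor"""
--     bits = [1, 1] + [0 if x == -1 else 1 for row in reversed(resultMap) for x in row] + [1, 1]
--     print(bits)
--     print(len(bits))
--     if len(bits) % 4 != 0: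
--         return ''
--     return ''.join('0123456789abcdef'[8 * a + 4 * b + 2 * c + d]
--                    for a, b, c, d in zip(*[iter(bits)] * 4))
-- ===== Notes on version B (the rewrite author's own statement) =====
-- stated objective: simpler
-- what changed: get_hex's halving-val per-bit accumulator loop is replaced by direct 4-bit chunking (one table-lookup hex digit per chunk), and the descriptor bit list is built by a single comprehension over the reversed rows instead of nested append loops.
import Mathlib
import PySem

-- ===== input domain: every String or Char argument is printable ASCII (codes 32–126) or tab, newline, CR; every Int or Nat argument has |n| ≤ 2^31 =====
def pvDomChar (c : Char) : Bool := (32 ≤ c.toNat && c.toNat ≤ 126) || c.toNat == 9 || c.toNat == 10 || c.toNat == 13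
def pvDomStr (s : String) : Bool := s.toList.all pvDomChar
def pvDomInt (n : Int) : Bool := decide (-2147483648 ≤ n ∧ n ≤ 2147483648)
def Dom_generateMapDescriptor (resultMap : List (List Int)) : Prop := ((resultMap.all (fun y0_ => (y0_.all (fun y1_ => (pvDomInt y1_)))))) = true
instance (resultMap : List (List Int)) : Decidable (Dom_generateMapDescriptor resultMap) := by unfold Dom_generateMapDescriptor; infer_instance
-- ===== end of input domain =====

-- B replaces A's halving-`val` bit accumulator in get_hex by direct 4-bit chunking
-- (one hex digit per chunk via a table lookup), and builds the descriptor bits by a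
-- comprehension instead of nested append loops.  Objective: simpler.
-- Both Pythons print the descriptor list and its length; the equivalence proved here
-- is about the RETURN value only.

-- ===== PORT A =====
-- hex(n)[2:] — exact for 0 ≤ n ≤ 15, the only values reached (the bits are 0/1)
def hexA (n : Int) : String :=
  String.ofList [Char.ofNat (if n < 10 then 48 + n.toNat else 87 + n.toNat)]

-- get_hex's for-loop: state (current, val, ans), one step per element of ar
def getHexLoop : List Int → Int → Int → String → String
  | [], _, _, ans => ans
  | x :: rest, current, val, ans =>
    let current' := current + val * x
    let val' := PySem.Int.floordiv val 2
    if val' = 0 then getHexLoop rest 0 8 (ans ++ hexA current')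
    else getHexLoop rest current' val' ans

-- literal port of get_hex
def getHexA (ar : List Int) : String :=
  if ar.length % 4 ≠ 0 then "" else getHexLoop ar 0 8 ""

def generateMapDescriptor (resultMap : List (List Int)) : String :=
  -- temp = copy.copy(resultMap); for i in range(len(temp)-1,-1,-1): for j …: append 0/1
  let md := resultMap.reverse.foldl (fun acc row =>
      row.foldl (fun acc2 x => if x = -1 then acc2 ++ [(0 : Int)] else acc2 ++ [1]) acc)
    [1, 1]
  -- the two print statements are IO only; the return value is get_hex(mapDescriptor)
  getHexA (md ++ [1, 1])

-- ===== PORT B =====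
-- '0123456789abcdef'[n] — n is always 0..15 here, where pyGet? returns some
def hexB (n : Int) : String :=
  match PySem.Str.pyGet? "0123456789abcdef" n with
  | some c => String.ofList [c]
  | none => ""

-- one hex digit per 4-bit chunk (Source B's zip(*[iter(bits)]*4) join)
def nibHex : List Int → String
  | a :: b :: c :: d :: rest => hexB (8 * a + 4 * b + 2 * c + d) ++ nibHex rest
  | _ => ""

def generateMapDescriptor_alt (resultMap : List (List Int)) : String :=
  let bits := [1, 1] ++
      (resultMap.reverse.flatMap (fun row => row.map (fun x => if x = -1 then (0 : Int) else 1)))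
      ++ [1, 1]
  if bits.length % 4 ≠ 0 then "" else nibHex bits

-- ===== PRECONDITION & SPEC =====
def Spec_generateMapDescriptor (resultMap : List (List Int)) (out : String) : Prop := out = generateMapDescriptor_alt resultMap
instance (resultMap : List (List Int)) (out : String) : Decidable (Spec_generateMapDescriptor resultMap out) := by unfold Spec_generateMapDescriptor; infer_instance

-- ===== CLAIM (what is proved, stated in full; the proofs are below) =====
def Claim_equal_generateMapDescriptor : Prop := ∀ (resultMap : List (List Int)), Dom_generateMapDescriptor resultMap → Spec_generateMapDescriptor resultMap (generateMapDescriptor resultMap)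

-- ===== LEMMAS AND PROOFS =====

-- the bit list both ports build
def bitsOf (resultMap : List (List Int)) : List Int :=
  [1, 1] ++ (resultMap.reverse.flatMap (fun row => row.map (fun x => if x = -1 then (0 : Int) else 1))) ++ [1, 1]

lemma md_eq (resultMap : List (List Int)) :
    (resultMap.reverse.foldl (fun acc row =>
        row.foldl (fun acc2 x => if x = -1 then acc2 ++ [(0 : Int)] else acc2 ++ [1]) acc)
      [1, 1]) ++ [1, 1] = bitsOf resultMap := by
  have hrow : ∀ (row : List Int) (acc : List Int),
      row.foldl (fun acc2 x => if x = -1 then acc2 ++ [(0 : Int)] else acc2 ++ [1]) acc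
        = acc ++ row.map (fun x => if x = -1 then (0 : Int) else 1) := by
    intro row
    induction row with
    | nil => intro acc; simp
    | cons y ys ih =>
      intro acc
      by_cases h : y = -1 <;> simp [List.foldl, h, ih]
  have hout : ∀ (rows : List (List Int)) (acc : List Int),
      rows.foldl (fun acc row =>
          row.foldl (fun acc2 x => if x = -1 then acc2 ++ [(0 : Int)] else acc2 ++ [1]) acc) acc
        = acc ++ rows.flatMap (fun row => row.map (fun x => if x = -1 then (0 : Int) else 1)) := by
    intro rows acc
    simp only [hrow]
    rw [PySem.List.foldl_append_eq_flatMap]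
  simp [bitsOf, hout]

lemma bits_01 (resultMap : List (List Int)) :
    ∀ x ∈ bitsOf resultMap, x = 0 ∨ x = 1 := by
  intro x hx
  simp only [bitsOf, List.mem_append, List.mem_cons, List.mem_flatMap, List.mem_map] at hx
  rcases hx with (h | ⟨row, _, y, _, hy⟩) | h
  · rcases h with h | h | h <;> simp_all
  · by_cases hy' : y = -1 <;> simp [hy'] at hy <;> omega
  · rcases h with h | h | h <;> simp_all

lemma hex_eq (n : Int) (hn : 0 ≤ n) (hn' : n ≤ 15) : hexA n = hexB n := by
  interval_cases n <;> decide

-- A's accumulator loop, started at (0, 8, ans), emits one hex digit per 4 bits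
lemma loop_eq : ∀ (ar : List Int), (∀ x ∈ ar, x = 0 ∨ x = 1) →
    ∀ ans : String, getHexLoop ar 0 8 ans = ans ++ nibHex ar := by
  intro ar
  induction ar using nibHex.induct with
  | case1 a b c d rest ih =>
    intro h01 ans
    have ha := h01 a (by simp); have hb := h01 b (by simp)
    have hc := h01 c (by simp); have hd := h01 d (by simp)
    have hrest : ∀ x ∈ rest, x = 0 ∨ x = 1 := fun x hx => h01 x (by simp [hx])
    have h1 : getHexLoop (a :: b :: c :: d :: rest) 0 8 ans
        = getHexLoop rest 0 8 (ans ++ hexA (0 + 8 * a + 4 * b + 2 * c + 1 * d)) := by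
      simp only [getHexLoop]
      norm_num [show PySem.Int.floordiv 8 2 = 4 from by decide,
        show PySem.Int.floordiv 4 2 = 2 from by decide,
        show PySem.Int.floordiv 2 2 = 1 from by decide,
        show PySem.Int.floordiv 1 2 = 0 from by decide]
    rw [h1, ih hrest]
    have hval : (0 : Int) ≤ 0 + 8 * a + 4 * b + 2 * c + 1 * d ∧
        0 + 8 * a + 4 * b + 2 * c + 1 * d ≤ 15 := by
      rcases ha with ha | ha <;> rcases hb with hb | hb <;> rcases hc with hc | hc <;>
        rcases hd with hd | hd <;> subst ha hb hc hd <;> norm_num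
    rw [hex_eq _ hval.1 hval.2]
    simp only [nibHex, ← String.append_assoc]
    congr 2
    ring_nf
  | case2 ar hshape =>
    intro h01 ans
    rcases ar with _ | ⟨a, _ | ⟨b, _ | ⟨c, _ | ⟨d, rest⟩⟩⟩⟩
    · simp [getHexLoop, nibHex]
    · simp [getHexLoop, nibHex]
    · simp [getHexLoop, nibHex]
    · simp [getHexLoop, nibHex]
    · exact absurd rfl (hshape a b c d rest)

-- ===== VERDICT (by name: the statement is the Claim_ definition above) =====
theorem generateMapDescriptor_spec : Claim_equal_generateMapDescriptor := by
  intro resultMap _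
  show generateMapDescriptor resultMap = generateMapDescriptor_alt resultMap
  have hA : generateMapDescriptor resultMap = getHexA (bitsOf resultMap) := by
    show getHexA _ = _
    rw [md_eq]
  have hB : generateMapDescriptor_alt resultMap
      = if (bitsOf resultMap).length % 4 ≠ 0 then "" else nibHex (bitsOf resultMap) := rfl
  rw [hA, hB]
  unfold getHexA
  by_cases h : (bitsOf resultMap).length % 4 = 0
  · simp only [h, ne_eq, not_true_eq_false, if_false]
    simpa using loop_eq (bitsOf resultMap) (bits_01 resultMap) ""
  · simp [h]
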